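-- pv_equiv track=rewrite | github.com/aviswerdlow/k4 | archive/experiments/flint_otp_traverse/build_keystreams.py | walk_diagonal
-- ===== SOURCE A (Python) =====
-- from typing import Dict, List, Tuple
--
-- def digits_only(s: str) -> str:
--     """Keep only digits 0-9"""
--     return ''.join(c for c in s if c.isdigit())
--
-- def walk_diagonal(table_json: Dict, kind: str = "main") -> str:
--     """Walk table diagonally to extract digit stream"""
--     if not table_json["cells"]:
--         return ""
--
--     result = []
--     rows = table_json["cells"]
--     num_rows = len(rows)
--     num_cols = max(len(row) for row in rows) if rows else 0
--
--     if kind == "main":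
--         # Main diagonal walk
--         for d in range(num_rows + num_cols - 1):
--             for i in range(max(0, d - num_cols + 1), min(d + 1, num_rows)):
--                 j = d - i
--                 if j < len(rows[i]):
--                     result.append(digits_only(str(rows[i][j])))
--     else:
--         # Anti-diagonal walk
--         for d in range(num_rows + num_cols - 1):
--             for i in range(max(0, d - num_cols + 1), min(d + 1, num_rows)):
--                 j = num_cols - 1 - (d - i)
--                 if 0 <= j < len(rows[i]):
--                     result.append(digits_only(str(rows[i][j])))
--
--     return ''.join(result)
-- ===== SOURCE B (Python) =====
-- def digits_only(s: str) -> str: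
--     """Keep only digits 0-9"""
--     return ''.join(c for c in s if c.isdigit())
--
-- def walk_diagonal(table_json, kind: str = "main") -> str:
--     """Walk table diagonally to extract digit stream (bucket-by-diagonal version)."""
--     rows = table_json["cells"]
--     if not rows:
--         return ""
--     num_cols = max(len(row) for row in rows)
--     buckets = [[] for _ in range(len(rows) + num_cols - 1)]
--     for i, row in enumerate(rows):
--         for j, cell in enumerate(row):
--             d = i + j if kind == "main" else i + (num_cols - 1 - j)
--             buckets[d].append(digits_only(str(cell)))
--     return ''.join(s for bucket in buckets for s in bucket)
-- ===== Notes on version B (the rewrite author's own statement) =====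
-- stated objective: alternative
-- what changed: B replaces A's per-diagonal nested index scan (with computed per-diagonal bounds) by a single enumerate pass over the cells that buckets each cell's digit string under its diagonal index, then concatenates the buckets in order.
import Mathlib
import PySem

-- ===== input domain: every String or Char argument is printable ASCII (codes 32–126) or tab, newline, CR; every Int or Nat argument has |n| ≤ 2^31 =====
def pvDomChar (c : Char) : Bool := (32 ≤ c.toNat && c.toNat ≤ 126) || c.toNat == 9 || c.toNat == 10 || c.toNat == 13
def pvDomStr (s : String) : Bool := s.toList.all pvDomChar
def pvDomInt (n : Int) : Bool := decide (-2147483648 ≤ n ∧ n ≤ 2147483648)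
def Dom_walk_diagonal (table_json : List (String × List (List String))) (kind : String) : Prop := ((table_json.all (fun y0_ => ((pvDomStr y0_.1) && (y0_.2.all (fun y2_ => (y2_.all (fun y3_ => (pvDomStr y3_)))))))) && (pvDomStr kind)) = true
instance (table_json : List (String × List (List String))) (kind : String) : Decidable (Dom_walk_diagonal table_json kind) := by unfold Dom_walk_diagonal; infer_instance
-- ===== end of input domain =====

-- B replaces A's per-diagonal bounded index scan by one enumerate pass that buckets each
-- cell's digits under its diagonal index and then emits the buckets in order (objective:
-- alternative decomposition, same asymptotic cost).

-- ===== PORT A =====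
-- digits_only: ''.join(c for c in s if c.isdigit()) — joining the kept single characters
-- of s IS filtering s's character list (exact on all strings).
def digits_only (s : String) : String :=
  String.ofList (s.toList.filter PySem.Chars.isdigit)

def walk_diagonal (table_json : List (String × List (List String))) (kind : String) : String :=
  match (PySem.Dict.mk table_json).get? "cells" with
  | none => ""   -- Python raises KeyError here; excluded by Pre_walk_diagonal
  | some rows =>
    if rows = [] then "" else
    let num_rows : Int := rows.length
    -- max(len(row) for row in rows) if rows else 0  (rows ≠ [] in this branch)
    let num_cols : Int :=
      if rows = [] then 0
      else (PySem.List.max? (rows.map (fun r => (r.length : Int))) (fun x => x)).getD 0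
    let result : List String :=
      if kind = "main" then
        (PySem.List.pyRange 0 (num_rows + num_cols - 1)).foldl (fun res d =>
          (PySem.List.pyRange (max 0 (d - num_cols + 1)) (min (d + 1) num_rows)).foldl (fun res i =>
            let j := d - i
            let row := PySem.List.pyGetD rows i []     -- i is in range 0..num_rows-1
            if j < (row.length : Int) then
              res ++ [digits_only (PySem.List.pyGetD row j "")]   -- j checked 'j < len(row)'
            else res) res) []
      else
        (PySem.List.pyRange 0 (num_rows + num_cols - 1)).foldl (fun res d =>
          (PySem.List.pyRange (max 0 (d - num_cols + 1)) (min (d + 1) num_rows)).foldl (fun res i =>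
            let j := num_cols - 1 - (d - i)
            let row := PySem.List.pyGetD rows i []
            if 0 ≤ j ∧ j < (row.length : Int) then
              res ++ [digits_only (PySem.List.pyGetD row j "")]
            else res) res) []
    PySem.Str.join "" result

-- ===== PORT B =====
def walk_diagonal_alt (table_json : List (String × List (List String))) (kind : String) : String :=
  match (PySem.Dict.mk table_json).get? "cells" with
  | none => ""   -- Python raises KeyError here; excluded by Pre_walk_diagonal
  | some rows =>
    if rows = [] then "" else
    let num_cols : Nat := (PySem.List.max? (rows.map List.length) (fun x => x)).getD 0
    let buckets : List (List String) :=
      (PySem.List.enumerate rows 0).foldl (fun bks p =>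
        (PySem.List.enumerate p.2 0).foldl (fun bks q =>
          let d : Int := if kind = "main" then p.1 + q.1 else p.1 + ((num_cols : Int) - 1 - q.1)
          -- d ≥ 0 always (enumerate indices are ≥ 0 and q.1 ≤ num_cols - 1), so .toNat is exact
          bks.modify d.toNat (fun b => b ++ [digits_only q.2])) bks)
        (List.replicate (rows.length + num_cols - 1) [])
    PySem.Str.join "" buckets.flatten

-- ===== PRECONDITION & SPEC =====
-- Pre_ excludes exactly the inputs whose dict has no "cells" key: Python A (and B) raise KeyError there.
def Pre_walk_diagonal (table_json : List (String × List (List String))) (kind : String) : Prop :=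
  ((PySem.Dict.mk table_json).get? "cells").isSome = true
instance (table_json : List (String × List (List String))) (kind : String) : Decidable (Pre_walk_diagonal table_json kind) := by unfold Pre_walk_diagonal; infer_instance

def pvWitness_walk_diagonal : (List (String × List (List String))) × String :=
  ([("cells", [["12", "a"], ["3"]])], "main")

def Spec_walk_diagonal (table_json : List (String × List (List String))) (kind : String) (out : String) : Prop := out = walk_diagonal_alt table_json kind
instance (table_json : List (String × List (List String))) (kind : String) (out : String) : Decidable (Spec_walk_diagonal table_json kind out) := by unfold Spec_walk_diagonal; infer_instance

-- ===== CLAIM (what is proved, stated in full; the proofs are below) =====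
def Claim_equal_walk_diagonal : Prop := ∀ (table_json : List (String × List (List String))) (kind : String), Dom_walk_diagonal table_json kind → Pre_walk_diagonal table_json kind → Spec_walk_diagonal table_json kind (walk_diagonal table_json kind)

-- ===== LEMMAS AND PROOFS =====

-- the per-cell contribution of cell (i, j(d,i)) to diagonal d: the shared normal form of both sides
def pvSel (rows : List (List String)) (C : Nat) (maink : Bool) (d : Nat) (i : Int) : List String :=
  let row := PySem.List.pyGetD rows i []
  let j : Int := if maink then (d : Int) - i else (C : Int) - 1 - ((d : Int) - i)
  if 0 ≤ j ∧ j < (row.length : Int) then [digits_only (PySem.List.pyGetD row j "")] else []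

def pvCanon (rows : List (List String)) (C : Nat) (maink : Bool) : List String :=
  (List.range (rows.length + C - 1)).flatMap (fun d =>
    (PySem.List.pyRange 0 (rows.length : Int)).flatMap (pvSel rows C maink d))

lemma pv_foldl_max_cast (t : List (List String)) (k : Nat) :
    List.foldl (fun a r => max a (r.length : Int)) (k : Int) t
      = ((List.foldl (fun a r => max a r.length) k t : Nat) : Int) := by
  induction t generalizing k with
  | nil => simp
  | cons r t ih => simpa [← Nat.cast_max] using ih (max k r.length)

lemma pv_numcols_cast (r : List String) (t : List (List String)) :
    (PySem.List.max? ((r :: t).map (fun x => (x.length : Int))) (fun x => x)).getD 0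
      = (((PySem.List.max? ((r :: t).map List.length) (fun x => x)).getD 0 : Nat) : Int) := by
  rw [List.map_cons, List.map_cons, PySem.List.max?_id_cons, PySem.List.max?_id_cons]
  simp only [Option.getD_some, List.foldl_map]
  exact pv_foldl_max_cast t r.length

lemma pv_len_le_maxlen (rows : List (List String)) (hne : rows ≠ []) :
    ∀ r ∈ rows, r.length ≤ (PySem.List.max? (rows.map List.length) (fun x => x)).getD 0 := by
  intro r hr
  obtain ⟨a, t, rfl⟩ : ∃ a t, rows = a :: t := by
    cases rows with | nil => exact absurd rfl hne | cons a t => exact ⟨a, t, rfl⟩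
  rw [List.map_cons, PySem.List.max?_id_cons, Option.getD_some]
  have := PySem.List.max?_isMax (xs := (a :: t).map List.length) (key := fun x => x)
    (m := List.foldl max a.length (t.map List.length))
  exact this (by rw [List.map_cons, PySem.List.max?_id_cons]) r.length (List.mem_map_of_mem hr)

lemma pv_map_filter_eq_flatMap {α β : Type} (l : List α) (p : α → Bool) (f : α → β) :
    (l.filter p).map f = l.flatMap (fun x => if p x then [f x] else []) := by
  induction l with
  | nil => simp
  | cons x t ih => by_cases h : p x <;> simp [h, ih]

lemma pv_foldl_modify_append {α : Type} (ps : List α) (k : α → Nat) (g : α → String)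
    (bks : List (List String)) (hk : ∀ p ∈ ps, k p < bks.length) :
    ps.foldl (fun b p => b.modify (k p) (fun x => x ++ [g p])) bks
      = bks.mapIdx (fun d b => b ++ ps.filterMap (fun p => if k p = d then some (g p) else none)) := by
  induction ps generalizing bks with
  | nil => apply List.ext_getElem <;> simp [List.getElem_mapIdx]
  | cons p t ih =>
    rw [List.foldl_cons, ih _ (by intro q hq; rw [List.length_modify]; exact hk q (List.mem_cons_of_mem _ hq))]
    apply List.ext_getElem
    · simp
    · intro d hd1 hd2
      simp only [List.getElem_mapIdx, List.getElem_modify, List.filterMap_cons]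
      by_cases h : k p = d
      · subst h
        simp [List.length_mapIdx, List.length_modify] at hd1
        rw [if_pos rfl, if_pos rfl]
        simp [List.append_assoc]
      · rw [if_neg h, if_neg h]

lemma pv_foldl_foldl_modify {α β : Type} (es : List α) (inner : α → List β)
    (k : α → β → Nat) (g : α → β → String) (bks : List (List String))
    (hk : ∀ e ∈ es, ∀ p ∈ inner e, k e p < bks.length) :
    es.foldl (fun b e => (inner e).foldl (fun b' p => b'.modify (k e p) (fun x => x ++ [g e p])) b) bks
      = bks.mapIdx (fun d b => b ++ es.flatMap (fun e =>
          (inner e).filterMap (fun p => if k e p = d then some (g e p) else none))) := by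
  induction es generalizing bks with
  | nil => apply List.ext_getElem <;> simp [List.getElem_mapIdx]
  | cons e t ih =>
    rw [List.foldl_cons, pv_foldl_modify_append _ _ _ _ (hk e (List.mem_cons_self)),
      ih _ (by intro e' he' q hq; rw [List.length_mapIdx]; exact hk e' (List.mem_cons_of_mem _ he') q hq)]
    apply List.ext_getElem
    · simp
    · intro d hd1 hd2
      simp [List.getElem_mapIdx, List.append_assoc]

lemma pv_mapIdx_replicate (D : Nat) (g : Nat → List String) :
    (List.replicate D ([] : List String)).mapIdx (fun d b => b ++ g d) = (List.range D).map g := by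
  apply List.ext_getElem <;> simp [List.getElem_mapIdx]

lemma pv_filterMap_enumerate_single (row : List String) (g : String → String) (s j0 : Int) :
    (PySem.List.enumerate row s).filterMap (fun q => if q.1 = j0 then some (g q.2) else none)
      = if s ≤ j0 ∧ j0 < s + row.length then [g (row.getD (j0 - s).toNat "")] else [] := by
  induction row generalizing s with
  | nil => simp [PySem.List.enumerate]
  | cons c t ih =>
    have hl : (((c :: t).length : Nat) : Int) = (t.length : Int) + 1 := by
      push_cast [List.length_cons]; ring
    rw [PySem.List.enumerate_cons, List.filterMap_cons]
    by_cases h : s = j0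
    · subst h
      rw [ih, if_neg (by omega : ¬ (s + 1 ≤ s ∧ s < s + 1 + t.length)),
        if_pos (by omega : s ≤ s ∧ s < s + ((c :: t).length : Nat))]
      simp
    · simp only [if_neg h]
      rw [ih]
      by_cases h2 : s + 1 ≤ j0 ∧ j0 < s + 1 + t.length
      · rw [if_pos h2, if_pos (by omega)]
        have : (j0 - s).toNat = (j0 - (s+1)).toNat + 1 := by omega
        simp [this]
      · rw [if_neg h2, if_neg (by omega)]

lemma pv_Aside (rows : List (List String)) (C : Nat) (maink : Bool)
    (hC : ∀ r ∈ rows, r.length ≤ C) (hne : rows ≠ []) :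
    (PySem.List.pyRange 0 ((rows.length : Int) + (C : Int) - 1)).foldl (fun res d =>
      (PySem.List.pyRange (max 0 (d - (C : Int) + 1)) (min (d + 1) (rows.length : Int))).foldl (fun res i =>
        if (if maink then (d - i) < ((PySem.List.pyGetD rows i []).length : Int)
            else 0 ≤ ((C : Int) - 1 - (d - i)) ∧ ((C : Int) - 1 - (d - i)) < ((PySem.List.pyGetD rows i []).length : Int)) then
          res ++ [digits_only (PySem.List.pyGetD (PySem.List.pyGetD rows i [])
            (if maink then d - i else (C : Int) - 1 - (d - i)) "")]
        else res) res) []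
      = pvCanon rows C maink := by
  have hn : 0 < rows.length := List.length_pos_iff.mpr hne
  have hcast : (rows.length : Int) + (C : Int) - 1 = ((rows.length + C - 1 : Nat) : Int) := by
    omega
  rw [hcast, PySem.List.pyRange_zero_natCast, List.foldl_map]
  rw [PySem.List.foldl_congr_mem _ _ (fun res d => res ++
      (PySem.List.pyRange 0 (rows.length : Int)).flatMap (pvSel rows C maink d)) _ ?hbody]
  case hbody =>
    intro res d hd
    rw [List.mem_range] at hd
    beta_reduce
    rw [PySem.List.foldl_append_ite
      (p := fun i : Int => if maink then (((d:Nat) : Int) - i) < ((PySem.List.pyGetD rows i []).length : Int)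
            else 0 ≤ ((C : Int) - 1 - (((d:Nat) : Int) - i)) ∧ ((C : Int) - 1 - (((d:Nat) : Int) - i)) < ((PySem.List.pyGetD rows i []).length : Int))
      (f := fun i : Int => digits_only (PySem.List.pyGetD (PySem.List.pyGetD rows i [])
            (if maink then ((d:Nat) : Int) - i else (C : Int) - 1 - (((d:Nat) : Int) - i)) ""))]
    rw [pv_map_filter_eq_flatMap]
    have hlo : (0 : Int) ≤ max 0 ((d : Int) - C + 1) := le_max_left _ _
    have hlohi : max 0 ((d : Int) - C + 1) ≤ min ((d : Int) + 1) (rows.length : Int) := by omega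
    have hhin : min ((d : Int) + 1) (rows.length : Int) ≤ (rows.length : Int) := min_le_right _ _
    rw [PySem.List.pyRange_one_append 0 (max 0 ((d : Int) - C + 1)) (rows.length : Int) hlo
        (le_trans hlohi hhin),
      PySem.List.pyRange_one_append (max 0 ((d : Int) - C + 1)) (min ((d : Int) + 1) (rows.length : Int))
        (rows.length : Int) hlohi hhin,
      List.flatMap_append, List.flatMap_append]
    have hrowlen : ∀ i : Int, 0 ≤ i → i < (rows.length : Int) →
        ((PySem.List.pyGetD rows i []).length : Int) ≤ (C : Int) := by
      intro i h0 h1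
      exact_mod_cast Int.ofNat_le.mpr (hC _ (PySem.List.pyGetD_mem rows [] (by constructor <;> omega)))
    have hleft : (PySem.List.pyRange 0 (max 0 ((d : Int) - C + 1))).flatMap (pvSel rows C maink d) = [] := by
      apply List.flatMap_eq_nil_iff.mpr
      intro i hi
      rw [PySem.List.mem_pyRange_one] at hi
      have := hrowlen i hi.1 (by omega)
      unfold pvSel
      cases maink <;> simp only [Bool.false_eq_true, if_true, if_false] <;>
        rw [if_neg (by omega)]
    have hright : (PySem.List.pyRange (min ((d : Int) + 1) (rows.length : Int)) (rows.length : Int)).flatMap (pvSel rows C maink d) = [] := by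
      apply List.flatMap_eq_nil_iff.mpr
      intro i hi
      rw [PySem.List.mem_pyRange_one] at hi
      have := hrowlen i (by omega) hi.2
      unfold pvSel
      cases maink <;> simp only [Bool.false_eq_true, if_true, if_false] <;>
        rw [if_neg (by omega)]
    rw [hleft, hright, List.nil_append, List.append_nil]
    congr 1
    apply List.flatMap_congr
    intro i hi
    rw [PySem.List.mem_pyRange_one] at hi
    have hle := hrowlen i (by omega) (by omega)
    unfold pvSel
    cases maink <;>
      simp only [Bool.false_eq_true, if_true, if_false, decide_eq_true_eq] <;>
      split_ifs with h1 h2 <;>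
      first | rfl | omega
  rw [PySem.List.foldl_append_eq_flatMap]
  simp [pvCanon]

lemma pv_Bside (rows : List (List String)) (C : Nat) (maink : Bool)
    (hC : ∀ r ∈ rows, r.length ≤ C) (hne : rows ≠ []) :
    ((PySem.List.enumerate rows 0).foldl (fun bks p =>
        (PySem.List.enumerate p.2 0).foldl (fun bks q =>
          bks.modify (if maink then p.1 + q.1 else p.1 + ((C : Int) - 1 - q.1)).toNat
            (fun b => b ++ [digits_only q.2])) bks)
        (List.replicate (rows.length + C - 1) [])).flatten
      = pvCanon rows C maink := by
  have hn : 0 < rows.length := List.length_pos_iff.mpr hne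
  rw [pv_foldl_foldl_modify (PySem.List.enumerate rows 0) (fun e => PySem.List.enumerate e.2 0)
      (fun e p => (if maink then e.1 + p.1 else e.1 + ((C : Int) - 1 - p.1)).toNat)
      (fun _ q => digits_only q.2) _ ?hk]
  case hk =>
    intro e he q hq
    rw [List.length_replicate]
    rw [PySem.List.mem_enumerate_iff] at he hq
    obtain ⟨i, hi, rfl⟩ := he
    obtain ⟨j, hj, rfl⟩ := hq
    have hrc : rows[i].length ≤ C := hC _ (List.getElem_mem hi)
    cases maink <;>
      simp only [Bool.false_eq_true, if_true, if_false, zero_add] at hj ⊢ <;> omega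
  rw [pv_mapIdx_replicate, List.flatten_eq_flatMap, List.flatMap_map]
  unfold pvCanon
  apply List.flatMap_congr
  intro d hd
  rw [List.mem_range] at hd
  rw [PySem.List.enumerate_eq_map_pyRange rows ([] : List String), List.flatMap_map,
    PySem.List.len_eq]
  apply List.flatMap_congr
  intro i hi
  rw [PySem.List.mem_pyRange_one] at hi
  set row := PySem.List.pyGetD rows i [] with hrow
  have hmem : row ∈ rows := PySem.List.pyGetD_mem rows [] (by constructor <;> omega)
  have hrc : row.length ≤ C := hC _ hmem
  set j0 : Int := if maink then (d : Int) - i else (C : Int) - 1 - ((d : Int) - i) with hj0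
  have hcong : ∀ q ∈ PySem.List.enumerate row 0,
      (fun q : Int × String => if (if maink then i + q.1 else i + ((C : Int) - 1 - q.1)).toNat = d
        then some (digits_only q.2) else none) q
      = (fun q : Int × String => if q.1 = j0 then some (digits_only q.2) else none) q := by
    intro q hq
    rw [PySem.List.mem_enumerate_iff] at hq
    obtain ⟨k, hk, rfl⟩ := hq
    have hkC : k < C := lt_of_lt_of_le hk hrc
    refine if_congr ?_ rfl rfl
    cases maink <;> simp only [Bool.false_eq_true, if_true, if_false, hj0] <;> omega
  rw [List.filterMap_congr hcong, pv_filterMap_enumerate_single row digits_only 0 j0]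
  unfold pvSel
  simp only [← hrow, ← hj0]
  by_cases hc : 0 ≤ j0 ∧ j0 < (row.length : Int)
  · rw [if_pos (by omega), if_pos hc, PySem.List.pyGetD_of_nonneg row "" hc.1]
    simp
  · rw [if_neg (by omega), if_neg hc]

-- ===== VERDICT (by name: the statement is the Claim_ definition above) =====
theorem walk_diagonal_spec : Claim_equal_walk_diagonal := by
  intro table_json kind _dom hpre
  unfold Spec_walk_diagonal walk_diagonal walk_diagonal_alt
  unfold Pre_walk_diagonal at hpre
  obtain ⟨rows, hrows⟩ := Option.isSome_iff_exists.mp hpre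
  rw [hrows]
  dsimp only
  by_cases hnil : rows = []
  · simp [hnil]
  · rw [if_neg hnil, if_neg hnil, if_neg hnil]
    obtain ⟨a, t, rfl⟩ : ∃ a t, rows = a :: t := by
      cases rows with | nil => exact absurd rfl hnil | cons a t => exact ⟨a, t, rfl⟩
    have hC := pv_len_le_maxlen (a :: t) hnil
    rw [pv_numcols_cast a t]
    set C : Nat := (PySem.List.max? ((a :: t).map List.length) (fun x => x)).getD 0 with hCdef
    by_cases hk : kind = "main"
    · simp only [hk]
      have hA := pv_Aside (a :: t) C true hC hnil
      have hB := pv_Bside (a :: t) C true hC hnil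
      simp only [if_true] at hA hB ⊢
      rw [hA, hB]
    · simp only [if_neg hk]
      have hA := pv_Aside (a :: t) C false hC hnil
      have hB := pv_Bside (a :: t) C false hC hnil
      simp only [Bool.false_eq_true, if_false] at hA hB
      rw [hA, hB]
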